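-- pv_equiv track=rewrite | github.com/ahmedsalah674/ir_project | ir project.py | positional
-- ===== SOURCE A (Python) =====
-- def positional (tokens): # get tokens and return []
--     pos_index = dict()
--     for index, term in enumerate(tokens): # index is int value for index and term is str value for token
--         if term in pos_index:
--             pos_index[term].append(index + 1)
--         else:
--             pos_index[term] = []
--             pos_index[term].append(index + 1)
--     return pos_index
-- ===== SOURCE B (Python) =====
-- def positional(tokens):
--     # different decomposition: collect distinct terms in first-appearance order,
--     # then build each term's position list by one comprehension scan
--     seen = []
--     for t in tokens:
--         if t not in seen:
--             seen.append(t)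
--     return {t: [i + 1 for i, x in enumerate(tokens) if x == t] for t in seen}
-- ===== Notes on version B (the rewrite author's own statement) =====
-- stated objective: alternative
-- what changed: A appends into a dict of lists in one incremental pass; B first dedupes the tokens into a first-appearance key list and then builds each term's position list by a separate comprehension scan over the enumerated tokens.
import Mathlib
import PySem

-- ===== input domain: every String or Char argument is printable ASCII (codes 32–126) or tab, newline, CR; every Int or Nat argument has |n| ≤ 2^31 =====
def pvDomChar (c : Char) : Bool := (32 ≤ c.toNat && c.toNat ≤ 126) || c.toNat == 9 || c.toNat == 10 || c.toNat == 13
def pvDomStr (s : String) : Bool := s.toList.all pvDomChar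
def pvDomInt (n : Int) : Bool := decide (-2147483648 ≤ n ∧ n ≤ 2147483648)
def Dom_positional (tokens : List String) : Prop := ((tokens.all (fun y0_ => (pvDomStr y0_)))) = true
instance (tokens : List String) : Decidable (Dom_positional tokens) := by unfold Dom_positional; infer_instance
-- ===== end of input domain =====

-- B replaces A's incremental append-into-dict pass by dedupe-then-per-term scans (objective: alternative).

-- ===== PORT A =====
def positional (tokens : List String) : List (String × List Int) :=
  ((PySem.List.enumerate tokens).foldl
    (fun d p =>
      if d.contains p.2 then
        d.insert p.2 (d.getD p.2 [] ++ [p.1 + 1])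
      else
        let d1 := d.insert p.2 ([] : List Int)
        d1.insert p.2 (d1.getD p.2 [] ++ [p.1 + 1]))
    PySem.Dict.empty).items

-- ===== PORT B =====
def positional_alt (tokens : List String) : List (String × List Int) :=
  let seen := PySem.Set.ofList tokens
  seen.map (fun t =>
    (t, ((PySem.List.enumerate tokens).filter (fun p => p.2 == t)).map (fun p => p.1 + 1)))

-- ===== PRECONDITION & SPEC =====
def Spec_positional (tokens : List String) (out : List (String × List Int)) : Prop := out = positional_alt tokens
instance (tokens : List String) (out : List (String × List Int)) : Decidable (Spec_positional tokens out) := by unfold Spec_positional; infer_instance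

-- ===== CLAIM (what is proved, stated in full; the proofs are below) =====
def Claim_equal_positional : Prop := ∀ (tokens : List String), Dom_positional tokens → Spec_positional tokens (positional tokens)

-- ===== LEMMAS AND PROOFS =====

-- A's loop body is exactly dict.modify term [] (· ++ [index+1])
theorem positional_step_eq (d : PySem.Dict String (List Int)) (p : Int × String) :
    (if d.contains p.2 then
        d.insert p.2 (d.getD p.2 [] ++ [p.1 + 1])
      else
        let d1 := d.insert p.2 ([] : List Int)
        d1.insert p.2 (d1.getD p.2 [] ++ [p.1 + 1]))
    = d.modify p.2 [] (· ++ [p.1 + 1]) := by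
  by_cases h : d.contains p.2
  · simp [h, PySem.Dict.modify]
  · simp only [h]
    rw [PySem.Dict.getD_insert_self, PySem.Dict.insert_insert_self]
    have h0 : d.getD p.2 [] = [] := PySem.Dict.getD_of_not_contains d [] (by simpa using h)
    simp [PySem.Dict.modify, h0]

theorem positional_eq_foldl_modify (tokens : List String) :
    positional tokens =
      (((PySem.List.enumerate tokens).map (fun p => (p.2, p.1 + 1))).foldl
        (fun d q => d.modify q.1 [] (· ++ [q.2])) PySem.Dict.empty).items := by
  unfold positional
  rw [List.foldl_map]
  have hfun : (fun (d : PySem.Dict String (List Int)) (p : Int × String) =>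
      if d.contains p.2 then
        d.insert p.2 (d.getD p.2 [] ++ [p.1 + 1])
      else
        let d1 := d.insert p.2 ([] : List Int)
        d1.insert p.2 (d1.getD p.2 [] ++ [p.1 + 1]))
    = (fun d p => d.modify p.2 [] (· ++ [p.1 + 1])) := by
    funext d p; exact positional_step_eq d p
  rw [hfun]

theorem positional_spec_aux (tokens : List String) :
    positional tokens = positional_alt tokens := by
  rw [positional_eq_foldl_modify]
  set l := (PySem.List.enumerate tokens).map (fun p => (p.2, p.1 + 1)) with hl
  have hnd : (l.foldl (fun d q => d.modify q.1 [] (· ++ [q.2])) PySem.Dict.empty).keys.Nodup := by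
    apply PySem.Dict.nodup_keys_foldl_modify_key l (fun q => q.1) [] (fun _ q => (· ++ [q.2]))
    simp
  have hkeys : (l.foldl (fun d q => d.modify q.1 [] (· ++ [q.2])) PySem.Dict.empty).keys
      = PySem.Set.ofList tokens := by
    rw [PySem.Dict.keys_foldl_modify_key]
    have : l.map (fun q => q.1) = tokens := by
      simp [hl, List.map_map, Function.comp_def]
    rw [this]
    simp [PySem.Set.update, PySem.Set.ofList_eq_foldl, PySem.Dict.keys_empty]
  rw [PySem.Dict.items_eq_map_keys _ hnd ([] : List Int), hkeys]
  unfold positional_alt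
  apply List.map_congr_left
  intro k _
  have hget := PySem.Dict.getD_foldl_modify_append l PySem.Dict.empty k
  rw [PySem.Dict.getD_empty] at hget
  rw [hget]
  simp [hl, List.filter_map, List.map_map, Function.comp_def]

-- ===== VERDICT (by name: the statement is the Claim_ definition above) =====
theorem positional_spec : Claim_equal_positional := by
  intro tokens _
  unfold Spec_positional
  exact positional_spec_aux tokens
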